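-- pv_equiv track=rewrite | github.com/noah-mclain/Jarvis-AI-Assistant | other_files/text_code_generation/src/generative_ai_module/jarvis_unified.py | determine_best_dataset
-- ===== SOURCE A (Python) =====
-- def determine_best_dataset(prompt: str) -> str:
--     """
--     Determine the best dataset to use for a given prompt.
--
--     Args:
--         prompt: User's input prompt
--
--     Returns:
--         Name of the best dataset to use
--     """
--     # Simple keyword matching for dataset selection
--     prompt = prompt.lower()
--
--     # Check for code-related queries
--     code_keywords = ["code", "function", "program", "script", "class", "method", "algorithm"]
--     if any(keyword in prompt for keyword in code_keywords):
--         return "pile"  # The Pile has more code examples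
--
--     # Check for conversation and instruction following
--     conversation_keywords = ["explain", "how to", "help me", "what is", "can you"]
--     if any(keyword in prompt for keyword in conversation_keywords):
--         return "openassistant"  # OpenAssistant is better for conversational tasks
--
--     # Check for teaching-related queries
--     teaching_keywords = ["teach", "learn", "understand", "concept", "example", "tutorial"]
--     if any(keyword in prompt for keyword in teaching_keywords):
--         return "gpteacher"  # GPTeacher is designed for educational content
--
--     # Default to OpenAssistant for general queries
--     return "openassistant"
-- ===== SOURCE B (Python) =====
-- def determine_best_dataset(prompt: str) -> str:
--     """Single left-to-right scan of the prompt, minimizing rule priority over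
--     keyword matches found at each position (0=code, 1=conversation, 2=teaching)."""
--     names = ["pile", "openassistant", "gpteacher", "openassistant"]
--     priority = {
--         "code": 0, "function": 0, "program": 0, "script": 0,
--         "class": 0, "method": 0, "algorithm": 0,
--         "explain": 1, "how to": 1, "help me": 1, "what is": 1, "can you": 1,
--         "teach": 2, "learn": 2, "understand": 2, "concept": 2,
--         "example": 2, "tutorial": 2,
--     }
--     p = prompt.lower()
--     best = 3
--     for i in range(len(p)):
--         for kw, pr in priority.items():
--             if pr < best and p.startswith(kw, i):
--                 best = pr
--     return names[best]
-- ===== Notes on version B (the rewrite author's own statement) =====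
-- stated objective: alternative
-- what changed: Instead of three sequential any-substring checks with early returns, B makes a single left-to-right scan over the lowered prompt, at each position matching keywords from a keyword-to-priority map and accumulating the minimum priority seen; the final minimum indexes a name table (3 = no match = default).
import Mathlib
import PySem

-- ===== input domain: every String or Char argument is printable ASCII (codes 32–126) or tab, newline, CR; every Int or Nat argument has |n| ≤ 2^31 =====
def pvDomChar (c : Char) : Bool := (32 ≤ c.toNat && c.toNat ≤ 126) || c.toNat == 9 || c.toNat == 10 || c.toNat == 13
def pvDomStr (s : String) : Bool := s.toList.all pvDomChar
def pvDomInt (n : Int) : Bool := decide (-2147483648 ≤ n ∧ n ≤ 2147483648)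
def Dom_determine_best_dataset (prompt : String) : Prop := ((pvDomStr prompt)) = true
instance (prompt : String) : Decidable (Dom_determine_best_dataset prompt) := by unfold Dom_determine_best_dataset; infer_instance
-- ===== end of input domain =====

set_option maxHeartbeats 1000000

-- B replaces the three early-return any-substring checks by one left-to-right scan of the
-- prompt that accumulates the minimum rule priority among keywords matched at each position
-- (objective: alternative; same asymptotic cost).

-- ===== PORT A =====
def determine_best_dataset (prompt : String) : String :=
  let p := PySem.Str.lower prompt
  let code_keywords := ["code", "function", "program", "script", "class", "method", "algorithm"]
  if code_keywords.any (fun k => PySem.Str.isIn k p) then "pile"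
  else
    let conversation_keywords := ["explain", "how to", "help me", "what is", "can you"]
    if conversation_keywords.any (fun k => PySem.Str.isIn k p) then "openassistant"
    else
      let teaching_keywords := ["teach", "learn", "understand", "concept", "example", "tutorial"]
      if teaching_keywords.any (fun k => PySem.Str.isIn k p) then "gpteacher"
      else "openassistant"

-- ===== PORT B =====
-- the keyword -> priority dict of Source B (insertion order), keywords as char lists
def pvPriority : List (List Char × Nat) :=
  [("code".toList, 0), ("function".toList, 0), ("program".toList, 0), ("script".toList, 0),
   ("class".toList, 0), ("method".toList, 0), ("algorithm".toList, 0),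
   ("explain".toList, 1), ("how to".toList, 1), ("help me".toList, 1), ("what is".toList, 1),
   ("can you".toList, 1),
   ("teach".toList, 2), ("learn".toList, 2), ("understand".toList, 2), ("concept".toList, 2),
   ("example".toList, 2), ("tutorial".toList, 2)]

def pvNames : List String := ["pile", "openassistant", "gpteacher", "openassistant"]

def determine_best_dataset_alt (prompt : String) : String :=
  let p := (PySem.Str.lower prompt).toList
  -- for i in range(len(p)): for kw, pr in priority.items(): if pr < best and p.startswith(kw, i): best = pr
  let best := (List.range p.length).foldl (fun best i =>
    pvPriority.foldl (fun b kv =>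
      if kv.2 < b ∧ PySem.Chars.startswith (p.drop i) kv.1 then kv.2 else b) best) 3
  pvNames.getD best ""   -- names[best]; best ≤ 3 always, so in range

-- ===== PRECONDITION & SPEC =====
def Spec_determine_best_dataset (prompt : String) (out : String) : Prop := out = determine_best_dataset_alt prompt
instance (prompt : String) (out : String) : Decidable (Spec_determine_best_dataset prompt out) := by unfold Spec_determine_best_dataset; infer_instance

-- ===== CLAIM (what is proved, stated in full; the proofs are below) =====
def Claim_equal_determine_best_dataset : Prop := ∀ (prompt : String), Dom_determine_best_dataset prompt → Spec_determine_best_dataset prompt (determine_best_dataset prompt)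

-- ===== LEMMAS AND PROOFS =====

-- the inner fold step of B's port, abstracted
def pvStep (c : List Char × Nat → Bool) (b : Nat) (kv : List Char × Nat) : Nat :=
  if kv.2 < b ∧ c kv then kv.2 else b

lemma pvStep_le (c : List Char × Nat → Bool) (b : Nat) (kv : List Char × Nat) :
    pvStep c b kv ≤ b := by
  unfold pvStep; split_ifs with h; exact Nat.le_of_lt h.1; exact le_rfl

lemma pvFoldl_le (c : List Char × Nat → Bool) (l : List (List Char × Nat)) (b : Nat) :
    l.foldl (pvStep c) b ≤ b := by
  induction l generalizing b with
  | nil => exact le_rfl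
  | cons a t ih => exact le_trans (ih _) (pvStep_le c b a)

lemma pvFoldl_le_mem (c : List Char × Nat → Bool) (l : List (List Char × Nat)) (b : Nat)
    (kv : List Char × Nat) (hm : kv ∈ l) (hc : c kv = true) :
    l.foldl (pvStep c) b ≤ kv.2 := by
  induction l generalizing b with
  | nil => cases hm
  | cons a t ih =>
    rcases List.mem_cons.mp hm with rfl | hm'
    · simp only [List.foldl_cons]
      refine le_trans (pvFoldl_le c t _) ?_
      unfold pvStep; split_ifs with h
      · exact le_rfl
      · have hb : ¬ kv.2 < b := fun hlt => h ⟨hlt, hc⟩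
        omega
    · exact ih _ hm'

lemma pvFoldl_cases (c : List Char × Nat → Bool) (l : List (List Char × Nat)) (b : Nat) :
    l.foldl (pvStep c) b = b ∨ ∃ kv ∈ l, c kv = true ∧ l.foldl (pvStep c) b = kv.2 := by
  induction l generalizing b with
  | nil => exact Or.inl rfl
  | cons a t ih =>
    by_cases hb : a.2 < b ∧ c a = true
    · have hst : pvStep c b a = a.2 := by unfold pvStep; rw [if_pos hb]
      simp only [List.foldl_cons, hst]
      rcases ih a.2 with h | ⟨kv, hkv, hc, he⟩
      · exact Or.inr ⟨a, List.mem_cons_self .., hb.2, h⟩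
      · exact Or.inr ⟨kv, List.mem_cons_of_mem _ hkv, hc, he⟩
    · have hst : pvStep c b a = b := by unfold pvStep; rw [if_neg hb]
      simp only [List.foldl_cons, hst]
      rcases ih b with h | ⟨kv, hkv, hc, he⟩
      · exact Or.inl h
      · exact Or.inr ⟨kv, List.mem_cons_of_mem _ hkv, hc, he⟩

-- B's double fold, with the condition depending on the position i
def pvBest (p : List Char) : Nat :=
  (List.range p.length).foldl (fun best i =>
    pvPriority.foldl (pvStep (fun kv => PySem.Chars.startswith (p.drop i) kv.1)) best) 3

lemma pvOuterFoldl_le (p : List Char) (l : List Nat) (b : Nat) :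
    l.foldl (fun best i => pvPriority.foldl (pvStep (fun kv => PySem.Chars.startswith (p.drop i) kv.1)) best) b ≤ b := by
  induction l generalizing b with
  | nil => exact le_rfl
  | cons a t ih =>
    simp only [List.foldl_cons]
    exact le_trans (ih _) (pvFoldl_le _ _ _)

-- occurrence of any keyword of priority j somewhere in p
def pvM (p : List Char) (j : Nat) : Prop :=
  ∃ kv ∈ pvPriority, kv.2 = j ∧ ∃ i ∈ List.range p.length, PySem.Chars.startswith (p.drop i) kv.1 = true

lemma pvBest_le (p : List Char) (j : Nat) (h : pvM p j) : pvBest p ≤ j := by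
  obtain ⟨kv, hkv, rfl, i, hi, hsw⟩ := h
  unfold pvBest
  obtain ⟨l1, l2, hsplit⟩ := List.append_of_mem hi
  rw [hsplit, List.foldl_append, List.foldl_cons]
  exact le_trans (pvOuterFoldl_le p l2 _) (pvFoldl_le_mem _ _ _ kv hkv hsw)

lemma pvOuterFoldl_cases (p : List Char) (rng : List Nat) (b : Nat)
    (hsub : ∀ i ∈ rng, i ∈ List.range p.length) :
    rng.foldl (fun best i => pvPriority.foldl (pvStep (fun kv => PySem.Chars.startswith (p.drop i) kv.1)) best) b = b ∨
      ∃ j, pvM p j ∧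
        rng.foldl (fun best i => pvPriority.foldl (pvStep (fun kv => PySem.Chars.startswith (p.drop i) kv.1)) best) b = j := by
  induction rng generalizing b with
  | nil => exact Or.inl rfl
  | cons i t ih =>
    simp only [List.foldl_cons]
    rcases ih _ (fun x hx => hsub x (List.mem_cons_of_mem _ hx)) with h | ⟨j, hj, he⟩
    · rw [h]
      rcases pvFoldl_cases (fun kv => PySem.Chars.startswith (p.drop i) kv.1) pvPriority b with h2 | ⟨kv, hkv, hc, he⟩
      · exact Or.inl h2
      · exact Or.inr ⟨kv.2, ⟨kv, hkv, rfl, i, hsub i (List.mem_cons_self ..), hc⟩, he⟩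
    · exact Or.inr ⟨j, hj, he⟩

lemma pvBest_cases (p : List Char) : pvBest p = 3 ∨ ∃ j, pvM p j ∧ pvBest p = j :=
  pvOuterFoldl_cases p (List.range p.length) 3 (fun _ h => h)

-- a nonempty keyword occurs at some scanned position iff it is a substring
lemma pvOcc_iff (p kw : List Char) (hkw : kw ≠ []) :
    (∃ i ∈ List.range p.length, PySem.Chars.startswith (p.drop i) kw = true) ↔
      PySem.Chars.isIn kw p = true := by
  rw [← PySem.Chars.exists_prefix_drop_iff_isIn]
  constructor
  · rintro ⟨i, _, h⟩; exact ⟨i, (PySem.Chars.startswith_iff _ _).mp h⟩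
  · rintro ⟨j, hj⟩
    refine ⟨j, List.mem_range.mpr ?_, (PySem.Chars.startswith_iff _ _).mpr hj⟩
    by_contra hge
    push_neg at hge
    rw [List.drop_eq_nil_of_le hge] at hj
    exact hkw (List.prefix_nil.mp hj)

-- bridge between pvM and A's per-group any-checks
lemma pvM_of_any (p : List Char) (ks : List String) (j : Nat)
    (hmap : ∀ k ∈ ks, ((k.toList, j) ∈ pvPriority ∧ k.toList ≠ []))
    (h : ks.any (fun k => PySem.Chars.isIn k.toList p) = true) : pvM p j := by
  obtain ⟨k, hk, hIn⟩ := List.any_eq_true.mp h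
  obtain ⟨i, hi, hsw⟩ := (pvOcc_iff p k.toList (hmap k hk).2).mpr hIn
  exact ⟨(k.toList, j), (hmap k hk).1, rfl, i, hi, hsw⟩

lemma pvAny_of_M (p : List Char) (ks : List String) (j : Nat)
    (hback : ∀ kv ∈ pvPriority, kv.2 = j → ∃ k ∈ ks, kv.1 = k.toList)
    (hne : ∀ kv ∈ pvPriority, kv.1 ≠ [])
    (h : pvM p j) : ks.any (fun k => PySem.Chars.isIn k.toList p) = true := by
  obtain ⟨kv, hkv, hj, hocc⟩ := h
  obtain ⟨k, hk, hkeq⟩ := hback kv hkv hj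
  refine List.any_eq_true.mpr ⟨k, hk, ?_⟩
  rw [← hkeq]
  exact (pvOcc_iff p kv.1 (hne kv hkv)).mp hocc

lemma pvM_range (p : List Char) (j : Nat) (h : pvM p j) : j = 0 ∨ j = 1 ∨ j = 2 := by
  obtain ⟨kv, hkv, hj, _⟩ := h
  subst hj
  revert hkv
  have : ∀ kv ∈ pvPriority, kv.2 = 0 ∨ kv.2 = 1 ∨ kv.2 = 2 := by decide
  exact this kv

def pvCode : List String := ["code", "function", "program", "script", "class", "method", "algorithm"]
def pvConv : List String := ["explain", "how to", "help me", "what is", "can you"]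
def pvTeach : List String := ["teach", "learn", "understand", "concept", "example", "tutorial"]

lemma pvNe : ∀ kv ∈ pvPriority, kv.1 ≠ [] := by decide
lemma pvMap0 : ∀ k ∈ pvCode, ((k.toList, 0) ∈ pvPriority ∧ k.toList ≠ []) := by decide
lemma pvMap1 : ∀ k ∈ pvConv, ((k.toList, 1) ∈ pvPriority ∧ k.toList ≠ []) := by decide
lemma pvMap2 : ∀ k ∈ pvTeach, ((k.toList, 2) ∈ pvPriority ∧ k.toList ≠ []) := by decide
lemma pvBack0 : ∀ kv ∈ pvPriority, kv.2 = 0 → ∃ k ∈ pvCode, kv.1 = k.toList := by decide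
lemma pvBack1 : ∀ kv ∈ pvPriority, kv.2 = 1 → ∃ k ∈ pvConv, kv.1 = k.toList := by decide
lemma pvBack2 : ∀ kv ∈ pvPriority, kv.2 = 2 → ∃ k ∈ pvTeach, kv.1 = k.toList := by decide

-- ===== VERDICT (by name: the statement is the Claim_ definition above) =====
theorem determine_best_dataset_spec : Claim_equal_determine_best_dataset := by
  intro prompt _
  unfold Spec_determine_best_dataset determine_best_dataset determine_best_dataset_alt
  show _ = pvNames.getD (pvBest (PySem.Str.lower prompt).toList) ""
  set p := (PySem.Str.lower prompt).toList with hp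
  by_cases h0 : pvCode.any (fun k => PySem.Chars.isIn k.toList p) = true
  · have hM : pvM p 0 := pvM_of_any p pvCode 0 pvMap0 h0
    have hb : pvBest p = 0 := Nat.le_zero.mp (pvBest_le p 0 hM)
    rw [hb]
    rw [if_pos (by simpa [pvCode, hp] using h0)]
    rfl
  · have hn0 : ¬ pvM p 0 := fun hM => h0 (pvAny_of_M p pvCode 0 pvBack0 pvNe hM)
    rw [if_neg (by simpa [pvCode, hp] using h0)]
    by_cases h1 : pvConv.any (fun k => PySem.Chars.isIn k.toList p) = true
    · have hM : pvM p 1 := pvM_of_any p pvConv 1 pvMap1 h1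
      have hle : pvBest p ≤ 1 := pvBest_le p 1 hM
      have hb : pvBest p = 1 := by
        rcases pvBest_cases p with h | ⟨j, hMj, he⟩
        · omega
        · rcases pvM_range p j hMj with rfl | rfl | rfl
          · exact absurd hMj hn0
          · exact he
          · omega
      rw [hb]
      rw [if_pos (by simpa [pvConv, hp] using h1)]
      rfl
    · have hn1 : ¬ pvM p 1 := fun hM => h1 (pvAny_of_M p pvConv 1 pvBack1 pvNe hM)
      rw [if_neg (by simpa [pvConv, hp] using h1)]
      by_cases h2 : pvTeach.any (fun k => PySem.Chars.isIn k.toList p) = true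
      · have hM : pvM p 2 := pvM_of_any p pvTeach 2 pvMap2 h2
        have hle : pvBest p ≤ 2 := pvBest_le p 2 hM
        have hb : pvBest p = 2 := by
          rcases pvBest_cases p with h | ⟨j, hMj, he⟩
          · omega
          · rcases pvM_range p j hMj with rfl | rfl | rfl
            · exact absurd hMj hn0
            · exact absurd hMj hn1
            · exact he
        rw [hb]
        rw [if_pos (by simpa [pvTeach, hp] using h2)]
        rfl
      · have hn2 : ¬ pvM p 2 := fun hM => h2 (pvAny_of_M p pvTeach 2 pvBack2 pvNe hM)
        have hb : pvBest p = 3 := by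
          rcases pvBest_cases p with h | ⟨j, hMj, he⟩
          · exact h
          · rcases pvM_range p j hMj with rfl | rfl | rfl
            · exact absurd hMj hn0
            · exact absurd hMj hn1
            · exact absurd hMj hn2
        rw [hb]
        rw [if_neg (by simpa [pvTeach, hp] using h2)]
        rfl
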